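-- pv_equiv track=rewrite | github.com/kirksland/SK_launcher | ui/utils/thumbnails.py | _preferred_exr_channel
-- ===== SOURCE A (Python) =====
-- def _preferred_exr_channel(channel_names: list[str]) -> str:
--     groups: dict[str, set[str]] = {}
--     for name in channel_names:
--         if "." in name:
--             prefix, suffix = name.rsplit(".", 1)
--             groups.setdefault(prefix, set()).add(suffix.upper())
--         else:
--             groups.setdefault("", set()).add(name.upper())
--     if {"R", "G", "B"}.issubset(groups.get("", set())):
--         if "A" in groups.get("", set()):
--             return "RGBA"
--         return "RGB"
--     for prefix in sorted(key for key in groups.keys() if key):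
--         if {"R", "G", "B"}.issubset(groups.get(prefix, set())):
--             return f"{prefix}.RGB"
--     return channel_names[0]
-- ===== SOURCE B (Python) =====
-- def _split_last(name: str) -> tuple[str, str]:
--     head, _, tail = name.rpartition(".")
--     return (head, tail.upper())
--
--
-- def _preferred_exr_channel(channel_names: list[str]) -> str:
--     # Parse every name once into a (prefix, SUFFIX) pair, sort the pairs by
--     # prefix, then scan each consecutive run of equal prefixes -- no dict of
--     # sets; "" sorts first, so the plain-RGB(A) group is checked first.
--     pairs = sorted((_split_last(name) for name in channel_names), key=lambda p: p[0])
--     i, n = 0, len(pairs)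
--     while i < n:
--         prefix = pairs[i][0]
--         sufs = set()
--         while i < n and pairs[i][0] == prefix:
--             sufs.add(pairs[i][1])
--             i += 1
--         if {"R", "G", "B"} <= sufs:
--             if prefix == "":
--                 return "RGBA" if "A" in sufs else "RGB"
--             return prefix + ".RGB"
--     return channel_names[0]
-- ===== Notes on version B (the rewrite author's own statement) =====
-- stated objective: alternative
-- what changed: Replaces the dict-of-sets grouping plus separate sorted-keys pass by parsing each name once into a (prefix, upper-suffix) pair, sorting the pairs by prefix, and scanning consecutive equal-prefix runs in one pass ('' sorts first, so the plain RGB/RGBA group is naturally checked first).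
import Mathlib
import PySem

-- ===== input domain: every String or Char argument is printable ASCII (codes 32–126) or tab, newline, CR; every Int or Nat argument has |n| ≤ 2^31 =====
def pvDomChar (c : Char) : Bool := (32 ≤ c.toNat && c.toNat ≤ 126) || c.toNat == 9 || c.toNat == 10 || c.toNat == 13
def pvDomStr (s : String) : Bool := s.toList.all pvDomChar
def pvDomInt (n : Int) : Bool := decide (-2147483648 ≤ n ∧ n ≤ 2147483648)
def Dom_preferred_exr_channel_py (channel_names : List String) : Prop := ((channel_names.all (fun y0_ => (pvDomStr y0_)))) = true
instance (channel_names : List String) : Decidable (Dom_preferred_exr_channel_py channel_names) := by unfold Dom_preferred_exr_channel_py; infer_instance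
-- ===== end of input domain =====

-- B re-implements the channel-group choice by sorting (prefix, SUFFIX) pairs and scanning
-- consecutive equal-prefix runs, instead of A's dict-of-sets plus separate sorted-keys pass.

-- Shared hand port of splitting a name at its LAST '.' (Python rsplit(".", 1) / rpartition(".")):
-- returns none exactly when '.' does not occur in the name; exact on all inputs.
def pvLastDotSplit : List Char → Option (List Char × List Char)
  | [] => none
  | c :: rest =>
    match pvLastDotSplit rest with
    | some (a, b) => some (c :: a, b)
    | none => if c = '.' then some ([], rest) else none

-- ===== PORT A =====
-- the body of A's 'for name in channel_names' loop: the '"." in name' test and the rsplit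
-- are ported together through pvLastDotSplit (some = the '.' branch);
-- groups.setdefault(k, set()).add(v) is Dict.modify k ∅ (·.add v)
def pvStepA (d : PySem.Dict String (PySem.Set String)) (name : String) :
    PySem.Dict String (PySem.Set String) :=
  match pvLastDotSplit name.toList with
  | some (pre, suf) =>
      d.modify (String.ofList pre) PySem.Set.empty
        (fun s => s.add (PySem.Str.upper (String.ofList suf)))
  | none =>
      d.modify "" PySem.Set.empty (fun s => s.add (PySem.Str.upper name))

-- the 'for prefix in sorted(...)' loop with the final 'return channel_names[0]' fallback
def pvFindLoopA (groups : PySem.Dict String (PySem.Set String))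
    (channel_names : List String) : List String → String
  | [] => PySem.List.pyGetD channel_names 0 ""   -- channel_names[0]; empty list excluded by Pre_
  | p :: rest =>
      if PySem.Set.issubset (PySem.Set.ofList ["R", "G", "B"]) (groups.getD p PySem.Set.empty)
      then p ++ ".RGB"
      else pvFindLoopA groups channel_names rest

def preferred_exr_channel_py (channel_names : List String) : String :=
  let groups := channel_names.foldl pvStepA PySem.Dict.empty
  if PySem.Set.issubset (PySem.Set.ofList ["R", "G", "B"]) (groups.getD "" PySem.Set.empty) then
    if PySem.Set.contains (groups.getD "" PySem.Set.empty) "A" then "RGBA" else "RGB"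
  else
    pvFindLoopA groups channel_names
      (PySem.List.sorted ((groups.keys).filter (fun k => !(k == ""))) (fun k => k) false)

-- ===== PORT B =====
-- _split_last(name): rpartition(".") ported through pvLastDotSplit, upper-cased tail
def pvKeyOf (name : String) : String × String :=
  match pvLastDotSplit name.toList with
  | some (h, t) => (String.ofList h, PySem.Str.upper (String.ofList t))
  | none => ("", PySem.Str.upper name)

-- the inner 'while i < n and pairs[i][0] == prefix' loop: collect the run's suffix set
def pvCollectRun (p : String) : List (String × String) → PySem.Set String →
    PySem.Set String × List (String × String)
  | [], s => (s, [])
  | (q, v) :: rest, s =>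
      if q = p then pvCollectRun p rest (PySem.Set.add s v) else (s, (q, v) :: rest)

theorem pvCollectRun_length_le (p : String) (l : List (String × String)) (s : PySem.Set String) :
    (pvCollectRun p l s).2.length ≤ l.length := by
  induction l generalizing s with
  | nil => simp [pvCollectRun]
  | cons x rest ih =>
      obtain ⟨q, v⟩ := x
      by_cases h : q = p
      · simpa [pvCollectRun, h] using Nat.le_succ_of_le (ih _)
      · simp [pvCollectRun, h]

-- the outer 'while i < n' loop over the sorted pair list
def pvScanB (channel_names : List String) : List (String × String) → String
  | [] => PySem.List.pyGetD channel_names 0 ""   -- channel_names[0]; empty list excluded by Pre_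
  | (p, v) :: rest =>
      let r := pvCollectRun p rest (PySem.Set.add PySem.Set.empty v)
      if PySem.Set.issubset (PySem.Set.ofList ["R", "G", "B"]) r.1 then
        if p = "" then (if PySem.Set.contains r.1 "A" then "RGBA" else "RGB")
        else p ++ ".RGB"
      else pvScanB channel_names r.2
  termination_by l => l.length
  decreasing_by
    simpa using Nat.lt_succ_of_le (pvCollectRun_length_le p rest (PySem.Set.add PySem.Set.empty v))

def preferred_exr_channel_py_alt (channel_names : List String) : String :=
  pvScanB channel_names
    (PySem.List.sorted (channel_names.map pvKeyOf) (fun p => p.1) false)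

-- ===== PRECONDITION & SPEC =====
-- Pre_ excludes only the empty list, on which both Pythons raise IndexError at channel_names[0].
def Pre_preferred_exr_channel_py (channel_names : List String) : Prop := channel_names ≠ []
instance (channel_names : List String) : Decidable (Pre_preferred_exr_channel_py channel_names) := by unfold Pre_preferred_exr_channel_py; infer_instance
def pvWitness_preferred_exr_channel_py : List String := ["beauty.R", "beauty.G", "beauty.B", "Z"]

def Spec_preferred_exr_channel_py (channel_names : List String) (out : String) : Prop := out = preferred_exr_channel_py_alt channel_names
instance (channel_names : List String) (out : String) : Decidable (Spec_preferred_exr_channel_py channel_names out) := by unfold Spec_preferred_exr_channel_py; infer_instance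

-- ===== CLAIM (what is proved, stated in full; the proofs are below) =====
def Claim_equal_preferred_exr_channel_py : Prop := ∀ (channel_names : List String), Dom_preferred_exr_channel_py channel_names → Pre_preferred_exr_channel_py channel_names → Spec_preferred_exr_channel_py channel_names (preferred_exr_channel_py channel_names)

-- ===== LEMMAS AND PROOFS =====

-- the reference first-match loop both sides are reduced to: walk a prefix list,
-- looking each prefix's suffix set up through M
def pvRef (channel_names : List String) (M : String → PySem.Set String) : List String → String
  | [] => PySem.List.pyGetD channel_names 0 ""
  | p :: rest =>
      if PySem.Set.issubset (PySem.Set.ofList ["R", "G", "B"]) (M p) then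
        if p = "" then (if PySem.Set.contains (M p) "A" then "RGBA" else "RGB")
        else p ++ ".RGB"
      else pvRef channel_names M rest

theorem pvStepA_eq (d : PySem.Dict String (PySem.Set String)) (name : String) :
    pvStepA d name
      = d.modify (pvKeyOf name).1 PySem.Set.empty (fun s => s.add (pvKeyOf name).2) := by
  unfold pvStepA pvKeyOf
  cases h : pvLastDotSplit name.toList with
  | none => simp
  | some pr => obtain ⟨a, b⟩ := pr; simp


theorem pvGetD_foldl_stepA (l : List String) (d : PySem.Dict String (PySem.Set String))
    (p : String) :
    (l.foldl pvStepA d).getD p PySem.Set.empty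
      = PySem.Set.update (d.getD p PySem.Set.empty)
          (((l.map pvKeyOf).filter (fun pr => pr.1 == p)).map (·.2)) := by
  induction l generalizing d with
  | nil => simp [PySem.Set.update_nil]
  | cons x rest ih =>
      simp only [List.foldl_cons, List.map_cons, List.filter_cons]
      rw [ih, pvStepA_eq]
      by_cases h : (pvKeyOf x).1 = p
      · simp [h, PySem.Set.update_cons, PySem.Set.add_eq_ite, PySem.Set.empty]
      · simp [h, PySem.Dict.getD_modify, Ne.symm h]

theorem pvFoldl_stepA_eq (cn : List String) (d : PySem.Dict String (PySem.Set String)) :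
    cn.foldl pvStepA d
      = cn.foldl (fun d name =>
          d.modify (pvKeyOf name).1 PySem.Set.empty (fun s => s.add (pvKeyOf name).2)) d :=
  PySem.List.foldl_congr_mem cn pvStepA
    (fun d name => d.modify (pvKeyOf name).1 PySem.Set.empty (fun s => s.add (pvKeyOf name).2))
    d (fun acc => fun x _ => pvStepA_eq acc x)

theorem pvGroups_keys (cn : List String) :
    (cn.foldl pvStepA PySem.Dict.empty).keys
      = PySem.Set.ofList (cn.map (fun n => (pvKeyOf n).1)) := by
  rw [pvFoldl_stepA_eq]
  rw [PySem.Dict.keys_foldl_modify_key cn (fun n => (pvKeyOf n).1) PySem.Set.empty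
      (fun _ name s => s.add (pvKeyOf name).2) PySem.Dict.empty]
  simp [PySem.Set.update_nil_left]

theorem pvGroups_nodup_keys (cn : List String) :
    (cn.foldl pvStepA PySem.Dict.empty).keys.Nodup := by
  rw [pvFoldl_stepA_eq]
  exact PySem.Dict.nodup_keys_foldl_modify_key _ _ _ _ _ PySem.Dict.nodup_keys_empty

theorem pvCollectRun_spec (p : String) (l : List (String × String)) (s : PySem.Set String) :
    pvCollectRun p l s
      = (PySem.Set.update s ((l.takeWhile (fun pr => pr.1 == p)).map (·.2)),
         l.dropWhile (fun pr => pr.1 == p)) := by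
  induction l generalizing s with
  | nil => simp [pvCollectRun, PySem.Set.update_nil]
  | cons x rest ih =>
      obtain ⟨q, v⟩ := x
      by_cases h : q = p
      · simp [pvCollectRun, h, ih, PySem.Set.update_cons]
      · simp [pvCollectRun, h, PySem.Set.update_nil]

theorem pvDropWhile_ne (p : String) (l : List (String × String))
    (hord : l.Pairwise (fun a b => a.1 ≤ b.1)) (hge : ∀ x ∈ l, p ≤ x.1) :
    ∀ x ∈ l.dropWhile (fun pr => pr.1 == p), x.1 ≠ p := by
  induction l with
  | nil => simp
  | cons y rest ih =>
      rw [List.dropWhile_cons]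
      by_cases h : y.1 = p
      · simp only [h, beq_self_eq_true, if_true]
        exact ih hord.of_cons (fun x hx => hge x (List.mem_cons_of_mem _ hx))
      · simp only [beq_eq_false_iff_ne.mpr h]
        intro x hx
        rcases List.mem_cons.mp hx with heq | hx
        · exact heq ▸ h
        · have h1 : p < y.1 := lt_of_le_of_ne (hge y (List.mem_cons_self)) (Ne.symm h)
          have h2 : y.1 ≤ x.1 := (List.pairwise_cons.mp hord).1 x hx
          exact fun hc => absurd (hc ▸ h2) (not_le_of_gt h1)

theorem pvFilter_eq_takeWhile (p : String) (l : List (String × String))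
    (hord : l.Pairwise (fun a b => a.1 ≤ b.1)) (hge : ∀ x ∈ l, p ≤ x.1) :
    l.filter (fun pr => pr.1 == p) = l.takeWhile (fun pr => pr.1 == p) := by
  have h1 : (l.takeWhile (fun pr => pr.1 == p)).filter (fun pr => pr.1 == p)
      = l.takeWhile (fun pr => pr.1 == p) :=
    List.filter_eq_self.mpr (fun x hx => by simpa using List.mem_takeWhile_imp hx)
  have h2 : (l.dropWhile (fun pr => pr.1 == p)).filter (fun pr => pr.1 == p) = [] :=
    List.filter_eq_nil_iff.mpr
      (fun x hx => by simpa using pvDropWhile_ne p l hord hge x hx)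
  conv_lhs => rw [← List.takeWhile_append_dropWhile (p := fun pr => pr.1 == p) (l := l)]
  rw [List.filter_append, h1, h2, List.append_nil]

theorem pvOfList_sublist {α : Type} [BEq α] [LawfulBEq α] (l : List α) :
    (PySem.Set.ofList l).Sublist l := by
  induction l with
  | nil => simp [PySem.Set.ofList_nil]
  | cons x rest ih =>
      rw [PySem.Set.ofList_cons]
      exact List.Sublist.cons₂ x (List.Sublist.trans List.filter_sublist ih)

theorem pvRef_congr_eq (cn : List String) (M M' : String → PySem.Set String)
    (ps : List String) (h : ∀ p ∈ ps, M p = M' p) :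
    pvRef cn M ps = pvRef cn M' ps := by
  induction ps with
  | nil => rfl
  | cons p rest ih =>
      simp only [pvRef, h p List.mem_cons_self]
      rw [ih (fun q hq => h q (List.mem_cons_of_mem _ hq))]

theorem pvRef_congr_mem (cn : List String) (M M' : String → PySem.Set String)
    (ps : List String) (h : ∀ p ∈ ps, ∀ x, x ∈ M p ↔ x ∈ M' p) :
    pvRef cn M ps = pvRef cn M' ps := by
  induction ps with
  | nil => rfl
  | cons p rest ih =>
      have hsub : PySem.Set.issubset (PySem.Set.ofList ["R", "G", "B"]) (M p)
      = PySem.Set.issubset (PySem.Set.ofList ["R", "G", "B"]) (M' p) := by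
        by_cases hs : PySem.Set.issubset (PySem.Set.ofList ["R", "G", "B"]) (M p) = true
        · exact hs.trans (((PySem.Set.issubset_iff _ _).mpr
            (fun x hx => (h p List.mem_cons_self x).mp
              ((PySem.Set.issubset_iff _ _).mp hs x hx))).symm)
        · have : ¬ PySem.Set.issubset (PySem.Set.ofList ["R", "G", "B"]) (M' p) = true := by
            intro hs'
            exact hs ((PySem.Set.issubset_iff _ _).mpr
              (fun x hx => (h p List.mem_cons_self x).mpr
                ((PySem.Set.issubset_iff _ _).mp hs' x hx)))
          simp [Bool.eq_false_iff.mpr hs, Bool.eq_false_iff.mpr this]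
      have hA : PySem.Set.contains (M p) "A" = PySem.Set.contains (M' p) "A" := by
        by_cases hc : "A" ∈ M p
        · rw [(PySem.Set.contains_iff _ _).mpr hc,
            ((PySem.Set.contains_iff _ _).mpr ((h p List.mem_cons_self "A").mp hc)).symm]
        · have hc' : "A" ∉ M' p := fun hx => hc ((h p List.mem_cons_self "A").mpr hx)
          rw [Bool.eq_false_iff.mpr (fun hb => hc ((PySem.Set.contains_iff _ _).mp hb)),
            Bool.eq_false_iff.mpr (fun hb => hc' ((PySem.Set.contains_iff _ _).mp hb))]
      simp only [pvRef, hsub, hA]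
      rw [ih (fun q hq => h q (List.mem_cons_of_mem _ hq))]

theorem pvDiscard_of_not_mem {s : PySem.Set String} {p : String} (h : p ∉ s) :
    s.discard p = s := by
  simp only [PySem.Set.discard]
  exact List.filter_eq_self.mpr (fun y hy => by
    simp only [Bool.not_eq_true', beq_eq_false_iff_ne, ne_eq]
    exact fun hyp => h (hyp ▸ hy))

theorem pvOfList_cons_run (p : String) (l₁ l₂ : List String)
    (h1 : ∀ y ∈ l₁, y = p) (h2 : p ∉ l₂) :
    PySem.Set.ofList (p :: (l₁ ++ l₂)) = p :: PySem.Set.ofList l₂ := by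
  induction l₁ with
  | nil =>
      rw [List.nil_append, PySem.Set.ofList_cons,
        pvDiscard_of_not_mem (fun hm => h2 ((PySem.Set.mem_ofList l₂ p).mp hm))]
  | cons x l₁' ih =>
      have hx : x = p := h1 x List.mem_cons_self
      have ih' := ih (fun y hy => h1 y (List.mem_cons_of_mem _ hy))
      rw [List.cons_append, PySem.Set.ofList_cons, hx, ih']
      have hd : PySem.Set.discard (p :: PySem.Set.ofList l₂) p = PySem.Set.ofList l₂ := by
        simp only [PySem.Set.discard, List.filter_cons, beq_self_eq_true, Bool.not_true,
          Bool.false_eq_true, if_false]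
        exact List.filter_eq_self.mpr (fun y hy => by
          simp only [Bool.not_eq_true', beq_eq_false_iff_ne, ne_eq]
          exact fun hyp => h2 (hyp ▸ (PySem.Set.mem_ofList l₂ y).mp hy))
      rw [hd]

theorem pvScanB_eq_aux (cn : List String) (n : Nat) :
    ∀ (L : List (String × String)), L.length ≤ n →
    L.Pairwise (fun a b => a.1 ≤ b.1) →
    pvScanB cn L
      = pvRef cn
          (fun p => PySem.Set.ofList ((L.filter (fun pr => pr.1 == p)).map (·.2)))
          (PySem.Set.ofList (L.map (·.1))) := by
  induction n with
  | zero =>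
      intro L hlen _
      have : L = [] := List.length_eq_zero_iff.mp (Nat.le_zero.mp hlen)
      subst this
      simp [pvScanB, pvRef, PySem.Set.ofList_nil]
  | succ n ih =>
      intro L hlen hL
      match L with
      | [] => simp [pvScanB, pvRef, PySem.Set.ofList_nil]
      | (p, v) :: rest =>
        have hord_rest : rest.Pairwise (fun a b => a.1 ≤ b.1) :=
          (List.pairwise_cons.mp hL).2
        have hge : ∀ x ∈ rest, p ≤ x.1 := fun x hx =>
          (List.pairwise_cons.mp hL).1 x hx
        have hfil := pvFilter_eq_takeWhile p rest hord_rest hge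
        have hne := pvDropWhile_ne p rest hord_rest hge
        -- names for the run and the remainder
        set run := rest.takeWhile (fun pr => pr.1 == p) with hrun
        set rest' := rest.dropWhile (fun pr => pr.1 == p) with hrest'
        have hsplit : run ++ rest' = rest := List.takeWhile_append_dropWhile
        -- the head suffix set
        have hM : PySem.Set.ofList
            ((((p, v) :: rest).filter (fun pr => pr.1 == p)).map (·.2))
            = PySem.Set.update (PySem.Set.add PySem.Set.empty v) (run.map (·.2)) := by
          rw [List.filter_cons]
          simp only [beq_self_eq_true, if_pos]
          rw [hfil, List.map_cons, PySem.Set.ofList_cons_eq_update]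
          rfl
        -- the prefix list
        have hD : PySem.Set.ofList ((((p, v) :: rest).map (·.1)))
            = p :: PySem.Set.ofList (rest'.map (·.1)) := by
          rw [List.map_cons, ← hsplit, List.map_append]
          exact pvOfList_cons_run p _ _
            (fun y hy => by
              obtain ⟨x, hx, hxy⟩ := List.mem_map.mp hy
              exact hxy ▸ (by simpa using List.mem_takeWhile_imp hx))
            (fun hm => by
              obtain ⟨x, hx, hxy⟩ := List.mem_map.mp hm
              exact hne x hx hxy)
        have hlen' : rest'.length ≤ n := by
          have h1 : rest'.length ≤ rest.length := (List.dropWhile_sublist _).length_le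
          have h2 : rest.length ≤ n := by simpa using Nat.le_of_succ_le_succ hlen
          exact le_trans h1 h2
        have hpw' : rest'.Pairwise (fun a b => a.1 ≤ b.1) :=
          List.Pairwise.sublist (List.dropWhile_sublist _) hord_rest
        have hElse : pvScanB cn rest'
            = pvRef cn (fun q => PySem.Set.ofList
                ((((p, v) :: rest).filter (fun pr => pr.1 == q)).map (·.2)))
              (PySem.Set.ofList (rest'.map (·.1))) := by
          rw [ih rest' hlen' hpw']
          apply pvRef_congr_eq
          intro q hq
          obtain ⟨x, hx, hxq⟩ := List.mem_map.mp ((PySem.Set.mem_ofList _ q).mp hq)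
          have hqp : q ≠ p := hxq ▸ hne x hx
          have hfq : List.filter (fun pr => pr.1 == q) ((p, v) :: rest)
              = List.filter (fun pr => pr.1 == q) rest' := by
            rw [List.filter_cons]
            have hc : ((p, v).1 == q) = false := beq_eq_false_iff_ne.mpr (Ne.symm hqp)
            rw [hc]
            simp only [Bool.false_eq_true, if_false]
            rw [← hsplit, List.filter_append]
            rw [List.filter_eq_nil_iff.mpr (fun y hy => by
              have h1 : y.1 = p := by simpa using List.mem_takeWhile_imp hy
              simp [h1, Ne.symm hqp]), List.nil_append]
          rw [hfq]
        conv_rhs => rw [hD]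
        simp only [pvRef]
        rw [pvScanB, pvCollectRun_spec, ← hrun, ← hrest', ← hM, hElse]

theorem pvFindLoopA_eq (groups : PySem.Dict String (PySem.Set String)) (cn : List String)
    (ps : List String) (h : ∀ p ∈ ps, p ≠ "") :
    pvFindLoopA groups cn ps = pvRef cn (fun p => groups.getD p PySem.Set.empty) ps := by
  induction ps with
  | nil => rfl
  | cons p rest ih =>
      simp only [pvFindLoopA, pvRef, if_neg (h p List.mem_cons_self)]
      rw [ih (fun q hq => h q (List.mem_cons_of_mem _ hq))]

theorem pvA_eq (cn : List String) :
    preferred_exr_channel_py cn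
      = pvRef cn (fun p => (cn.foldl pvStepA PySem.Dict.empty).getD p PySem.Set.empty)
          ("" :: PySem.List.sorted
            (((cn.foldl pvStepA PySem.Dict.empty).keys).filter (fun k => !(k == "")))
            (fun k => k) false) := by
  have hmem : ∀ p ∈ PySem.List.sorted
      (((cn.foldl pvStepA PySem.Dict.empty).keys).filter (fun k => !(k == "")))
      (fun k => k) false, p ≠ "" := by
    intro p hp
    have := (PySem.List.mem_sorted _ _ _ _).mp hp
    simpa using (List.mem_filter.mp this).2
  simp only [preferred_exr_channel_py, pvRef]
  rw [pvFindLoopA_eq _ _ _ hmem]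
  simp

theorem pvStr_not_lt_empty (s : String) : ¬ s < "" := by
  simp [String.lt_iff_toList_lt]

-- the two programs agree on every channel list
theorem pvMain (cn : List String) :
    preferred_exr_channel_py cn = preferred_exr_channel_py_alt cn := by
  -- names
  have hL := PySem.List.sorted_pairwise (cn.map pvKeyOf) (fun pr => pr.1)
  have hperm := PySem.List.sorted_perm (cn.map pvKeyOf) (fun pr => pr.1) false
  -- B as pvRef
  have hB : preferred_exr_channel_py_alt cn
      = pvRef cn
          (fun p => PySem.Set.ofList
            ((((PySem.List.sorted (cn.map pvKeyOf) (fun pr => pr.1) false).filter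
              (fun pr => pr.1 == p)).map (·.2))))
          (PySem.Set.ofList
            ((PySem.List.sorted (cn.map pvKeyOf) (fun pr => pr.1) false).map (·.1))) := by
    unfold preferred_exr_channel_py_alt
    exact pvScanB_eq_aux cn (PySem.List.sorted (cn.map pvKeyOf) (fun pr => pr.1) false).length
      _ le_rfl hL
  -- replace the sorted list by the plain pair list in the suffix sets (same membership)
  have hB2 : preferred_exr_channel_py_alt cn
      = pvRef cn
          (fun p => PySem.Set.ofList
            (((cn.map pvKeyOf).filter (fun pr => pr.1 == p)).map (·.2)))
          (PySem.Set.ofList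
            ((PySem.List.sorted (cn.map pvKeyOf) (fun pr => pr.1) false).map (·.1))) := by
    rw [hB]
    apply pvRef_congr_mem
    intro p _ x
    rw [PySem.Set.mem_ofList, PySem.Set.mem_ofList]
    exact ((hperm.filter _).map _).mem_iff
  -- A as pvRef over the same suffix sets
  have hMG : ∀ p, (cn.foldl pvStepA PySem.Dict.empty).getD p PySem.Set.empty
      = PySem.Set.ofList (((cn.map pvKeyOf).filter (fun pr => pr.1 == p)).map (·.2)) := by
    intro p
    rw [pvGetD_foldl_stepA, PySem.Dict.getD_empty]
    exact PySem.Set.update_nil_left _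
  have hA : preferred_exr_channel_py cn
      = pvRef cn
          (fun p => PySem.Set.ofList
            (((cn.map pvKeyOf).filter (fun pr => pr.1 == p)).map (·.2)))
          ("" :: PySem.List.sorted
            (((cn.foldl pvStepA PySem.Dict.empty).keys).filter (fun k => !(k == "")))
            (fun k => k) false) := by
    rw [pvA_eq]
    exact pvRef_congr_eq _ _ _ _ (fun p _ => hMG p)
  rw [hA, hB2]
  -- now only the prefix lists differ; show they walk the same groups
  -- facts about D := ofList (L.map fst)
  have hDperm : ((PySem.List.sorted (cn.map pvKeyOf) (fun pr => pr.1) false).map (·.1)).Perm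
      ((cn.map pvKeyOf).map (·.1)) := hperm.map _
  have hDmem : ∀ x, x ∈ PySem.Set.ofList
      ((PySem.List.sorted (cn.map pvKeyOf) (fun pr => pr.1) false).map (·.1))
      ↔ x ∈ (cn.foldl pvStepA PySem.Dict.empty).keys := by
    intro x
    rw [PySem.Set.mem_ofList, pvGroups_keys, PySem.Set.mem_ofList, hDperm.mem_iff,
      List.map_map]
    rfl
  have hDpw : (PySem.Set.ofList
      ((PySem.List.sorted (cn.map pvKeyOf) (fun pr => pr.1) false).map (·.1))).Pairwise
      (fun a b => a ≤ b) :=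
    List.Pairwise.sublist (pvOfList_sublist _)
      (PySem.List.sorted_map_key_pairwise (cn.map pvKeyOf) (fun pr => pr.1))
  have hDnd : (PySem.Set.ofList
      ((PySem.List.sorted (cn.map pvKeyOf) (fun pr => pr.1) false).map (·.1))).Nodup :=
    PySem.Set.nodup_ofList _
  have hKnd : (((cn.foldl pvStepA PySem.Dict.empty).keys).filter (fun k => !(k == ""))).Nodup :=
    (pvGroups_nodup_keys cn).filter _
  set D := PySem.Set.ofList
    ((PySem.List.sorted (cn.map pvKeyOf) (fun pr => pr.1) false).map (·.1)) with hDdef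
  by_cases h0 : "" ∈ D
  · -- the "" group exists: D = "" :: tail and the tail is exactly A's sorted key list
    obtain ⟨d0, Dt, hD0⟩ := List.exists_cons_of_ne_nil (List.ne_nil_of_mem h0)
    rw [hD0] at h0 hDpw hDnd hDmem ⊢
    have hpwD := hDpw
    have hndD := hDnd
    have hd0 : d0 = "" := by
      rcases List.mem_cons.mp h0 with h | h
      · exact h.symm
      · have hle : d0 ≤ "" := (List.pairwise_cons.mp hpwD).1 "" h
        rcases lt_or_eq_of_le hle with hlt | he
        · exact absurd hlt (pvStr_not_lt_empty d0)
        · exact he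
    subst hd0
    have hnotDt : "" ∉ Dt := (List.nodup_cons.mp hndD).1
    have hKD : PySem.List.sorted
        (((cn.foldl pvStepA PySem.Dict.empty).keys).filter (fun k => !(k == "")))
        (fun k => k) false = Dt := by
      apply PySem.List.sorted_id_eq_of_perm_of_pairwise
      · rw [List.perm_ext_iff_of_nodup (List.nodup_cons.mp hndD).2 hKnd]
        intro a
        rw [List.mem_filter]
        constructor
        · intro ha
          have haD : a ∈ ("" :: Dt) := List.mem_cons_of_mem _ ha
          have hane : a ≠ "" := fun he => hnotDt (he ▸ ha)
          exact ⟨(hDmem a).mp haD, by simpa using hane⟩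
        · intro ⟨hk, hane⟩
          have : a ∈ ("" :: Dt) := (hDmem a).mpr hk
          rcases List.mem_cons.mp this with h | h
          · exact absurd h (by simpa using hane)
          · exact h
      · exact (List.pairwise_cons.mp hpwD).2
    rw [hKD]
  · -- no "" group: A's extra "" probe sees the empty set and falls through
    have hfe : (cn.map pvKeyOf).filter (fun pr => pr.1 == "") = [] := by
      apply List.filter_eq_nil_iff.mpr
      intro y hy
      simp only [beq_iff_eq]
      intro he
      apply h0
      rw [hDdef, PySem.Set.mem_ofList, hDperm.mem_iff]
      exact List.mem_map.mpr ⟨y, hy, he⟩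
    have hM0 : PySem.Set.ofList
        (((cn.map pvKeyOf).filter (fun pr => pr.1 == "")).map (·.2)) = [] := by
      rw [hfe]; rfl
    have hKD : PySem.List.sorted
        (((cn.foldl pvStepA PySem.Dict.empty).keys).filter (fun k => !(k == "")))
        (fun k => k) false = D := by
      apply PySem.List.sorted_id_eq_of_perm_of_pairwise
      · rw [List.perm_ext_iff_of_nodup hDnd hKnd]
        intro a
        rw [List.mem_filter]
        constructor
        · intro ha
          refine ⟨(hDmem a).mp ha, ?_⟩
          simp only [Bool.not_eq_true', beq_eq_false_iff_ne, ne_eq]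
          intro he
          exact h0 (he ▸ ha)
        · exact fun ⟨hk, _⟩ => (hDmem a).mpr hk
      · exact hDpw
    simp only [pvRef, hM0]
    rw [if_neg (by decide), hKD]

-- ===== VERDICT (by name: the statement is the Claim_ definition above) =====
theorem preferred_exr_channel_py_spec : Claim_equal_preferred_exr_channel_py := by
  intro cn _ _
  exact pvMain cn
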